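-- pv_equiv track=rewrite | github.com/Matheussoranco/M.I.A_Multimodal_Inteligent_Assistant | src/mia/reasoning/solvers.py | _has_color_mapping
-- ===== SOURCE A (Python) =====
-- from typing import Any, Dict, List, Optional, Tuple
--
-- def _has_color_mapping(inp: List[List], out: List[List]) -> bool:
--     """Check if there's a consistent color mapping."""
--     if not inp or not out:
--         return False
--
--     try:
--         mapping = {}
--         for i, row_in in enumerate(inp):
--             for j, val_in in enumerate(row_in):
--                 if i < len(out) and j < len(out[i]):
--                     val_out = out[i][j]
--                     if val_in in mapping:
--                         if mapping[val_in] != val_out: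
--                             return False
--                     else:
--                         mapping[val_in] = val_out
--         return len(mapping) > 0
--     except:
--         return False
-- ===== SOURCE B (Python) =====
-- def _has_color_mapping(inp, out):
--     """Check if there's a consistent color mapping."""
--     if not inp or not out:
--         return False
--     try:
--         pairs = {(v, w) for ri, ro in zip(inp, out) for v, w in zip(ri, ro)}
--         keys = {v for v, _ in pairs}
--         return len(pairs) > 0 and len(pairs) == len(keys)
--     except Exception:
--         return False
-- ===== Notes on version B (the rewrite author's own statement) =====
-- stated objective: alternative
-- what changed: Replaces A's incremental input->output mapping with early return on the first conflict by a set-cardinality criterion: B collects the set of distinct (v_in, v_out) cell pairs over the overlapping region and returns True iff the set is nonempty and the number of distinct pairs equals the number of distinct input values (a consistent mapping exists exactly when no input value occurs in two distinct pairs).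
import Mathlib
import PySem

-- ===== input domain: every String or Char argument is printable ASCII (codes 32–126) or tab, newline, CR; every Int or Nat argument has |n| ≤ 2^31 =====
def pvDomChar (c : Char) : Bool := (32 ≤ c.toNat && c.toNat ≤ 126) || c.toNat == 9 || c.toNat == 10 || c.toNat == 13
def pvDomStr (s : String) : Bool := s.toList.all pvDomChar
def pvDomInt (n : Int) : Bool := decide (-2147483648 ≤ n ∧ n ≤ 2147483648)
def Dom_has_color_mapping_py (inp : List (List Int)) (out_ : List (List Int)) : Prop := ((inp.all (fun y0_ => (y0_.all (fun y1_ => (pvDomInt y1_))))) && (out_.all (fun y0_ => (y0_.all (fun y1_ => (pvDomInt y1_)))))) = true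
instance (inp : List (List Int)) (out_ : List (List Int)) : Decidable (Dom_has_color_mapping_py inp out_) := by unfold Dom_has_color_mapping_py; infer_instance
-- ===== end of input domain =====

-- B replaces A's incremental input→output mapping with conflict detection by a set-cardinality
-- criterion: collect the distinct (v_in, v_out) cell pairs over the overlap and return True iff
-- there is at least one pair and as many distinct input values as distinct pairs (alternative
-- algorithm, same cost). The try/except in both Pythons can never fire on the typed int-grid
-- domain, so both ports omit it.

-- ===== PORT A =====
-- inner loop: 'for j, val_in in enumerate(row_in): if i < len(out) and j < len(out[i]): …'
-- (the bounds test is the two getElem? matches; 'return False' is the value none)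
def aInner (out_ : List (List Int)) (i : Nat) (row : List Int) (j : Nat)
    (m : PySem.Dict Int Int) : Option (PySem.Dict Int Int) :=
  match row with
  | [] => some m
  | v :: rest =>
    match out_[i]? with
    | some orow =>
      match orow[j]? with
      | some vo =>
        match m.get? v with
        | some w => if w ≠ vo then none else aInner out_ i rest (j+1) m
        | none => aInner out_ i rest (j+1) (m.insert v vo)
      | none => aInner out_ i rest (j+1) m
    | none => aInner out_ i rest (j+1) m

-- outer loop: 'for i, row_in in enumerate(inp): …'
def aOuter (out_ : List (List Int)) (i : Nat) (rows : List (List Int))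
    (m : PySem.Dict Int Int) : Option (PySem.Dict Int Int) :=
  match rows with
  | [] => some m
  | row :: rest =>
    match aInner out_ i row 0 m with
    | none => none
    | some m' => aOuter out_ (i+1) rest m'

def has_color_mapping_py (inp : List (List Int)) (out_ : List (List Int)) : Bool :=
  if inp.isEmpty || out_.isEmpty then false
  else
    match aOuter out_ 0 inp PySem.Dict.empty with
    | none => false
    | some m => decide (0 < m.size)

-- ===== PORT B =====
-- pairs = {(v, w) for ri, ro in zip(inp, out) for v, w in zip(ri, ro)}
-- keys = {v for v, _ in pairs}  (len only — order-independent)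
def has_color_mapping_py_alt (inp : List (List Int)) (out_ : List (List Int)) : Bool :=
  if inp.isEmpty || out_.isEmpty then false
  else
    let pairs : PySem.Set (Int × Int) :=
      (inp.zip out_).foldl (fun s rp => (rp.1.zip rp.2).foldl PySem.Set.add s) PySem.Set.empty
    let keys : PySem.Set Int := PySem.Set.ofList (pairs.map Prod.fst)
    decide (0 < PySem.Set.len pairs) && (PySem.Set.len pairs == PySem.Set.len keys)

-- ===== PRECONDITION & SPEC =====
def Spec_has_color_mapping_py (inp : List (List Int)) (out_ : List (List Int)) (out : Bool) : Prop := out = has_color_mapping_py_alt inp out_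
instance (inp : List (List Int)) (out_ : List (List Int)) (out : Bool) : Decidable (Spec_has_color_mapping_py inp out_ out) := by unfold Spec_has_color_mapping_py; infer_instance

-- ===== CLAIM (what is proved, stated in full; the proofs are below) =====
def Claim_equal_has_color_mapping_py : Prop := ∀ (inp : List (List Int)) (out_ : List (List Int)), Dom_has_color_mapping_py inp out_ → Spec_has_color_mapping_py inp out_ (has_color_mapping_py inp out_)

-- ===== LEMMAS AND PROOFS =====

-- A's nested loops, abstracted to the flat list of overlapping cells
def runA : List (Int × Int) → PySem.Dict Int Int → Option (PySem.Dict Int Int)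
  | [], m => some m
  | c :: rest, m =>
    match m.get? c.1 with
    | some w => if w ≠ c.2 then none else runA rest m
    | none => runA rest (m.insert c.1 c.2)

-- B's nested folds, abstracted likewise
def runS (cells : List (Int × Int)) (S : PySem.Set (Int × Int)) : PySem.Set (Int × Int) :=
  cells.foldl PySem.Set.add S

def finalA : Option (PySem.Dict Int Int) → Bool
  | none => false
  | some m => decide (0 < m.size)

def finalB (S : PySem.Set (Int × Int)) : Bool :=
  decide (0 < PySem.Set.len S) &&
    (PySem.Set.len S == PySem.Set.len (PySem.Set.ofList (S.map Prod.fst)))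

def cellsOf (inp : List (List Int)) (out_ : List (List Int)) : List (Int × Int) :=
  (inp.zip out_).flatMap (fun rp => rp.1.zip rp.2)

-- an inconsistent pair set: two distinct pairs sharing an input value
def Bad (S : List (Int × Int)) : Prop := ∃ p ∈ S, ∃ q ∈ S, p ≠ q ∧ p.1 = q.1

lemma ofList_length_toFinset (xs : List Int) :
    (PySem.Set.ofList xs).length = xs.toFinset.card := by
  have h1 := PySem.Set.nodup_ofList (α := Int) xs
  rw [← List.toFinset_card_of_nodup h1]
  congr 1
  ext x
  simp [PySem.Set.mem_ofList]

lemma finalB_of_bad (S : List (Int × Int)) (hbad : Bad S) :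
    finalB S = false := by
  obtain ⟨p, hp, q, hq, hpq, hfst⟩ := hbad
  have hnotnd : ¬ (S.map Prod.fst).Nodup := fun hmap =>
    hpq (List.inj_on_of_nodup_map hmap hp hq hfst)
  have hlt : (PySem.Set.ofList (S.map Prod.fst)).length < S.length := by
    rw [ofList_length_toFinset]
    calc (S.map Prod.fst).toFinset.card < (S.map Prod.fst).length := by
          have := List.toFinset_card_le (S.map Prod.fst)
          rcases lt_or_eq_of_le this with h1 | h1
          · exact h1
          · exact absurd (Multiset.toFinset_card_eq_card_iff_nodup.mp h1) hnotnd
      _ = S.length := List.length_map ..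
  have : (PySem.Set.len S == PySem.Set.len (PySem.Set.ofList (S.map Prod.fst))) = false := by
    simp only [PySem.Set.len, beq_eq_false_iff_ne, ne_eq]
    omega
  unfold finalB
  rw [this, Bool.and_false]

lemma runS_persist (cells : List (Int × Int)) :
    ∀ (S : List (Int × Int)), Bad S → Bad (runS cells S) := by
  induction cells with
  | nil => intro S h2; exact h2
  | cons c rest ih =>
    intro S h2
    refine ih (PySem.Set.add S c) ?_
    obtain ⟨p, hp, q, hq, hpq, hfst⟩ := h2
    exact ⟨p, by simp [pysem, hp], q, by simp [pysem, hq], hpq, hfst⟩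

lemma insert_fresh {ν : Type} (L : List (Int × ν)) (v : Int) (w : ν)
    (hg : (PySem.Dict.mk (ν := ν) L).get? v = none) :
    (PySem.Dict.mk L).insert v w = PySem.Dict.mk (L ++ [(v, w)]) := by
  apply PySem.Dict.ext
  rw [PySem.Dict.items_insert_of_not_contains]
  rw [PySem.Dict.contains_eq_isSome_get?, hg]; rfl

lemma nodup_append_fresh (L : List (Int × Int)) (v : Int) (w : Int)
    (hnd : (L.map Prod.fst).Nodup)
    (hg : (PySem.Dict.mk (ν := Int) L).get? v = none) :
    ((L ++ [(v, w)]).map Prod.fst).Nodup := by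
  have hnm : v ∉ L.map Prod.fst := by
    have := (PySem.Dict.get?_eq_none_iff_not_mem_keys (PySem.Dict.mk L) v).mp hg
    simpa [PySem.Dict.keys] using this
  simp only [List.map_append, List.map_cons, List.map_nil]
  simp [List.nodup_append, hnd]
  intro a x hmem ha
  exact hnm (ha ▸ List.mem_map.mpr ⟨(a, x), hmem, rfl⟩)

lemma not_mem_of_fresh (L : List (Int × Int)) (c : Int × Int)
    (hg : (PySem.Dict.mk (ν := Int) L).get? c.1 = none) : c ∉ L := by
  intro hmem
  have hnm := (PySem.Dict.get?_eq_none_iff_not_mem_keys (PySem.Dict.mk L) c.1).mp hg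
  apply hnm
  simp only [PySem.Dict.keys, List.mem_map]
  exact ⟨c, hmem, rfl⟩

-- the core correspondence: A's loop with mapping (Dict.mk L) ≙ B's loop with pair set L
lemma core (cells : List (Int × Int)) :
    ∀ (L : List (Int × Int)), (L.map Prod.fst).Nodup →
      finalA (runA cells (PySem.Dict.mk L)) = finalB (runS cells L) := by
  induction cells with
  | nil =>
    intro L hnd
    show decide (0 < (PySem.Dict.mk L).size) = finalB L
    have hself : PySem.Set.ofList (L.map Prod.fst) = L.map Prod.fst :=
      PySem.Set.ofList_eq_self_of_nodup _ hnd
    unfold finalB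
    rw [hself]
    simp only [PySem.Set.len, List.length_map, BEq.rfl, Bool.and_true]
    simp [PySem.Dict.size]
  | cons c rest ih =>
    intro L hnd
    have hrunS : runS (c :: rest) L = runS rest (PySem.Set.add L c) := rfl
    cases hg : (PySem.Dict.mk (ν := Int) L).get? c.1 with
    | none =>
      have hnm : c ∉ L := not_mem_of_fresh L c hg
      have hadd : PySem.Set.add L c = L ++ [c] := PySem.Set.add_of_not_mem hnm
      have hA : runA (c :: rest) (PySem.Dict.mk L) = runA rest (PySem.Dict.mk (L ++ [c])) := by
        show (match (PySem.Dict.mk L).get? c.1 with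
          | some w => if w ≠ c.2 then none else runA rest (PySem.Dict.mk L)
          | none => runA rest ((PySem.Dict.mk L).insert c.1 c.2)) = _
        rw [hg, insert_fresh L c.1 c.2 hg]
      rw [hrunS, hadd, hA]
      exact ih (L ++ [c]) (nodup_append_fresh L c.1 c.2 hnd hg)
    | some w =>
      have hpmem : (c.1, w) ∈ L := by
        have := PySem.Dict.mem_items_of_get?_eq_some (PySem.Dict.mk L) hg
        simpa using this
      by_cases hw : w = c.2
      · have hcmem : c ∈ L := by
          have : (c.1, w) = c := by rw [hw]
          exact this ▸ hpmem
        have hadd : PySem.Set.add L c = L := PySem.Set.add_of_mem hcmem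
        have hA : runA (c :: rest) (PySem.Dict.mk L) = runA rest (PySem.Dict.mk L) := by
          show (match (PySem.Dict.mk L).get? c.1 with
            | some w => if w ≠ c.2 then none else runA rest (PySem.Dict.mk L)
            | none => runA rest ((PySem.Dict.mk L).insert c.1 c.2)) = _
          rw [hg]; simp [hw]
        rw [hrunS, hadd, hA]
        exact ih L hnd
      · have hA : runA (c :: rest) (PySem.Dict.mk L) = none := by
          show (match (PySem.Dict.mk L).get? c.1 with
            | some w => if w ≠ c.2 then none else runA rest (PySem.Dict.mk L)
            | none => runA rest ((PySem.Dict.mk L).insert c.1 c.2)) = _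
          rw [hg]; simp [hw]
        have hcnm : c ∉ L := by
          intro hcmem
          have heq := List.inj_on_of_nodup_map hnd hpmem hcmem (rfl : ((c.1, w) : Int × Int).1 = c.1)
          exact hw (congrArg Prod.snd heq)
        have hadd : PySem.Set.add L c = L ++ [c] := PySem.Set.add_of_not_mem hcnm
        have hbad : Bad (L ++ [c]) := by
          refine ⟨(c.1, w), List.mem_append_left _ hpmem, c, List.mem_append_right _ (by simp), ?_, rfl⟩
          intro heq
          exact hw (congrArg Prod.snd heq)
        have hbad' := runS_persist rest (L ++ [c]) hbad
        rw [hrunS, hadd, hA]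
        exact (finalB_of_bad _ hbad').symm

lemma aInner_eq (out_ : List (List Int)) (i : Nat) (orow : List Int)
    (hi : out_[i]? = some orow) :
    ∀ (row : List Int) (j : Nat) (m : PySem.Dict Int Int),
      aInner out_ i row j m = runA (row.zip (orow.drop j)) m := by
  intro row
  induction row with
  | nil => intro j m; rfl
  | cons v rest ih =>
    intro j m
    cases hj : orow[j]? with
    | none =>
      have hlen : orow.length ≤ j := List.getElem?_eq_none_iff.mp hj
      have hd : orow.drop j = [] := List.drop_eq_nil_of_le hlen
      have hd1 : orow.drop (j+1) = [] := List.drop_eq_nil_of_le (by omega)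
      simp only [aInner, hi, hj, hd]
      rw [ih, hd1]
      simp [List.zip_nil_right]
    | some vo =>
      obtain ⟨hlt, hv⟩ := List.getElem?_eq_some_iff.mp hj
      have hd : orow.drop j = vo :: orow.drop (j+1) := by
        rw [List.drop_eq_getElem_cons hlt, hv]
      simp only [aInner, hi, hj, hd, List.zip_cons_cons, runA]
      cases hm : m.get? v with
      | some w => by_cases hw : w = vo <;> simp [hw, ih]
      | none => simp [ih]

lemma aInner_none (out_ : List (List Int)) (i : Nat) (hi : out_[i]? = none) :
    ∀ (row : List Int) (j : Nat) (m : PySem.Dict Int Int), aInner out_ i row j m = some m := by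
  intro row
  induction row with
  | nil => intro j m; rfl
  | cons v rest ih =>
    intro j m
    simp only [aInner, hi]
    exact ih (j+1) m

lemma runA_append (c1 c2 : List (Int × Int)) :
    ∀ m, runA (c1 ++ c2) m = match runA c1 m with
      | none => none
      | some m' => runA c2 m' := by
  induction c1 with
  | nil => intro m; rfl
  | cons c rest ih =>
    intro m
    simp only [List.cons_append, runA]
    cases m.get? c.1 with
    | some w => by_cases hw : w = c.2 <;> simp [hw, ih]
    | none => simp [ih]

lemma aOuter_eq (out_ : List (List Int)) :
    ∀ (rows : List (List Int)) (i : Nat) (m : PySem.Dict Int Int),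
      aOuter out_ i rows m
        = runA ((rows.zip (out_.drop i)).flatMap (fun rp => rp.1.zip rp.2)) m := by
  intro rows
  induction rows with
  | nil => intro i m; rfl
  | cons row rest ih =>
    intro i m
    cases hi : out_[i]? with
    | none =>
      have hlen : out_.length ≤ i := List.getElem?_eq_none_iff.mp hi
      have hd : out_.drop i = [] := List.drop_eq_nil_of_le hlen
      have hd1 : out_.drop (i+1) = [] := List.drop_eq_nil_of_le (by omega)
      simp only [aOuter, aInner_none out_ i hi, hd]
      rw [ih, hd1]
      simp [List.zip_nil_right]
    | some orow =>
      obtain ⟨hlt, hv⟩ := List.getElem?_eq_some_iff.mp hi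
      have hd : out_.drop i = orow :: out_.drop (i+1) := by
        rw [List.drop_eq_getElem_cons hlt, hv]
      simp only [aOuter, aInner_eq out_ i orow hi row 0 m, List.drop_zero, hd,
        List.zip_cons_cons, List.flatMap_cons]
      rw [runA_append]
      cases runA (row.zip orow) m with
      | none => rfl
      | some m' => exact ih (i+1) m'

-- ===== VERDICT (by name: the statement is the Claim_ definition above) =====
theorem has_color_mapping_py_spec : Claim_equal_has_color_mapping_py := by
  intro inp out_ _
  unfold Spec_has_color_mapping_py has_color_mapping_py has_color_mapping_py_alt
  by_cases hguard : (inp.isEmpty || out_.isEmpty) = true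
  · rw [if_pos hguard, if_pos hguard]
  · rw [if_neg hguard, if_neg hguard]
    have hB : (inp.zip out_).foldl (fun s rp => (rp.1.zip rp.2).foldl PySem.Set.add s)
        PySem.Set.empty = runS (cellsOf inp out_) [] := by
      show _ = ((inp.zip out_).flatMap (fun rp => rp.1.zip rp.2)).foldl PySem.Set.add []
      rw [List.foldl_flatMap]
      rfl
    have hA : aOuter out_ 0 inp PySem.Dict.empty
        = runA (cellsOf inp out_) (PySem.Dict.mk []) := by
      rw [aOuter_eq out_ inp 0 PySem.Dict.empty, List.drop_zero]
      rfl
    have hcore := core (cellsOf inp out_) [] (by simp)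
    rw [hB, hA]
    calc (match runA (cellsOf inp out_) (PySem.Dict.mk []) with
          | none => false
          | some m => decide (0 < m.size))
        = finalA (runA (cellsOf inp out_) (PySem.Dict.mk [])) := by
          cases runA (cellsOf inp out_) (PySem.Dict.mk []) <;> rfl
      _ = finalB (runS (cellsOf inp out_) []) := hcore
      _ = _ := rfl
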